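-- pv_equiv track=rewrite | github.com/gauthamchettiar/advent-of-code-2022 | week2/day7/solution.py | part2
-- ===== SOURCE A (Python) =====
-- def part2(dir: dict[str,dict]):
--     distance = float("inf")
--     dir_size = 0
--     required_size = 30000000 - (70000000 - int(dir["/"]["size"]))
--     for value in dir.values():
--         curr_distance = value.get("size", 0) - required_size
--         if curr_distance > 0 and curr_distance < distance:
--             distance = curr_distance
--             dir_size = value.get("size", 0)
--     return dir_size
-- ===== SOURCE B (Python) =====
-- def part2(dir: dict[str, dict]):
--     required_size = 30000000 - (70000000 - int(dir["/"]["size"]))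
--     for size in sorted(value.get("size", 0) for value in dir.values()):
--         if size > required_size:
--             return size
--     return 0
-- ===== Notes on version B (the rewrite author's own statement) =====
-- stated objective: alternative
-- what changed: Replaces A's single-pass min-distance tracking loop (with an infinity sentinel and two state variables) by collecting all sizes, sorting them ascending, and returning the first size strictly greater than the required size.
import Mathlib
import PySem

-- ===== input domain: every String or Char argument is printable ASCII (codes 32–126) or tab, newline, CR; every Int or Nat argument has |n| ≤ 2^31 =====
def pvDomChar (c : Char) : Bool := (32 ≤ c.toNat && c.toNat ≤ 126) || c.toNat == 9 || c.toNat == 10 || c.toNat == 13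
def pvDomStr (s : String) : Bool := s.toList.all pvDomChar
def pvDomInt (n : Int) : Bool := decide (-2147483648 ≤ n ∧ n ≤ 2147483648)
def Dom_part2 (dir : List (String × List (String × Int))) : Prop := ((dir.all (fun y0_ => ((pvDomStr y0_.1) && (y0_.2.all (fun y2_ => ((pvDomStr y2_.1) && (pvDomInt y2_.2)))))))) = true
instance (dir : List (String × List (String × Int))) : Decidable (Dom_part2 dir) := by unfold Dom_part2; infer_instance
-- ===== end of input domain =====

-- B replaces A's min-distance tracking loop by sort-ascending-then-return-first-size-over-threshold (alternative decomposition, same results).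


-- ===== PORT A =====
-- A's loop body: distance = float('inf') is the `none` of the Option Int state;
-- state = (distance, dir_size), updated when curr_distance > 0 and curr_distance < distance.
def part2Body (required : Int) (st : Option Int × Int) (value : List (String × Int)) :
    Option Int × Int :=
  let curr := (PySem.Dict.ofList value).getD "size" 0 - required
  if 0 < curr then
    match st.1 with
    | none => (some curr, (PySem.Dict.ofList value).getD "size" 0)
    | some d => if curr < d then (some curr, (PySem.Dict.ofList value).getD "size" 0) else st
  else st

def part2 (dir : List (String × List (String × Int))) : Int :=
  match (PySem.Dict.ofList dir).get? "/" with
  | none => 0      -- KeyError in Python: excluded by Pre_part2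
  | some root =>
    match (PySem.Dict.ofList root).get? "size" with
    | none => 0    -- KeyError in Python: excluded by Pre_part2
    | some rootSize =>
      let required : Int := 30000000 - (70000000 - rootSize)
      (((PySem.Dict.ofList dir).values).foldl (part2Body required) (none, 0)).2

-- ===== PORT B =====
-- the 'for size in sorted(...): if size > required_size: return size / return 0' loop
def firstGt (required : Int) : List Int → Int
  | [] => 0
  | s :: rest => if required < s then s else firstGt required rest

def part2_alt (dir : List (String × List (String × Int))) : Int :=
  match (PySem.Dict.ofList dir).get? "/" with
  | none => 0      -- KeyError in Python: excluded by Pre_part2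
  | some root =>
    match (PySem.Dict.ofList root).get? "size" with
    | none => 0    -- KeyError in Python: excluded by Pre_part2
    | some rootSize =>
      let required : Int := 30000000 - (70000000 - rootSize)
      firstGt required
        (PySem.List.sorted (((PySem.Dict.ofList dir).values).map
          (fun v => (PySem.Dict.ofList v).getD "size" 0)) (fun x => x) false)

-- ===== PRECONDITION & SPEC =====
-- Pre_ excludes exactly the inputs where Python A raises KeyError: no "/" key, or its value has no "size" key.
def Pre_part2 (dir : List (String × List (String × Int))) : Prop :=
  (((PySem.Dict.ofList dir).get? "/").bind
    (fun root => (PySem.Dict.ofList root).get? "size")).isSome = true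
instance (dir : List (String × List (String × Int))) : Decidable (Pre_part2 dir) := by
  unfold Pre_part2; infer_instance
def pvWitness_part2 : (List (String × List (String × Int))) :=
  [("/", [("size", 48000000)]), ("/a", [("size", 14000000)]), ("/b", [("size", 9000000)])]

def Spec_part2 (dir : List (String × List (String × Int))) (out : Int) : Prop := out = part2_alt dir
instance (dir : List (String × List (String × Int))) (out : Int) : Decidable (Spec_part2 dir out) := by unfold Spec_part2; infer_instance

-- ===== CLAIM (what is proved, stated in full; the proofs are below) =====
def Claim_equal_part2 : Prop := ∀ (dir : List (String × List (String × Int))), Dom_part2 dir → Pre_part2 dir → Spec_part2 dir (part2 dir)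

-- ===== LEMMAS AND PROOFS =====

-- the minimum element strictly greater than `required`, if any (proof-only spec)
def minGt (required : Int) : List Int → Option Int
  | [] => none
  | s :: S =>
    match minGt required S with
    | none => if required < s then some s else none
    | some m => if required < s then some (min s m) else some m

theorem mem_of_minGt_eq_some {required m : Int} {S : List Int} (h : minGt required S = some m) :
    m ∈ S := by
  induction S with
  | nil => simp [minGt] at h
  | cons s S ih =>
    simp only [minGt] at h
    cases hS : minGt required S with
    | none =>
      rw [hS] at h; split_ifs at h; simp_all
    | some m' =>
      rw [hS] at h
      split_ifs at h with hq
      · rcases le_total s m' with hle | hle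
        · simp [min_eq_left hle] at h; simp [h]
        · simp [min_eq_right hle] at h; subst h; exact List.mem_cons_of_mem _ (ih hS)
      · simp at h; subst h; exact List.mem_cons_of_mem _ (ih hS)

-- A's loop, once a finite distance d (with required < d) is held, computes min d (minGt …)
theorem foldlA_some (required : Int) (S : List Int) : ∀ d : Int, required < d →
    S.foldl (fun st s =>
      (if 0 < s - required then
        match st.1 with
        | none => (some (s - required), s)
        | some dd => if s - required < dd then (some (s - required), s) else st
      else st : Option Int × Int)) (some (d - required), d)
    = (match minGt required S with
       | none => (some (d - required), d)
       | some m => (some (min d m - required), min d m)) := by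
  induction S with
  | nil => intro d _; simp [minGt]
  | cons s S ih =>
    intro d hd
    simp only [List.foldl_cons, minGt]
    by_cases hq : required < s
    · have h0 : 0 < s - required := by omega
      by_cases hlt : s < d
      · have : s - required < d - required := by omega
        simp only [h0, if_pos, this]
        rw [ih s hq]
        cases hS : minGt required S with
        | none => simp [min_eq_right (le_of_lt hlt), hq]
        | some m =>
          have : min d (min s m) = min s m := min_eq_right (le_trans (min_le_left s m) (le_of_lt hlt))
          simp [hq, this]
      · have : ¬ (s - required < d - required) := by omega
        simp only [h0, if_pos, this, if_neg, not_false_iff]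
        rw [ih d hd]
        cases hS : minGt required S with
        | none => simp [hq, min_eq_left (by omega : d ≤ s)]
        | some m =>
          have : min d (min s m) = min d m := by
            rw [← min_assoc, min_eq_left (by omega : d ≤ s)]
          simp [hq, this]
    · have h0 : ¬ 0 < s - required := by omega
      simp only [h0, if_neg, not_false_iff]
      rw [ih d hd]
      cases minGt required S with
      | none => simp [hq]
      | some m => simp [hq]

-- A's whole loop from the initial state (∞, 0) returns minGt's value (0 if none)
theorem foldlA_none (required : Int) (S : List Int) :
    (S.foldl (fun st s =>
      (if 0 < s - required then
        match st.1 with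
        | none => (some (s - required), s)
        | some dd => if s - required < dd then (some (s - required), s) else st
      else st : Option Int × Int)) (none, 0)).2
    = (minGt required S).getD 0 := by
  induction S with
  | nil => simp [minGt]
  | cons s S ih =>
    simp only [List.foldl_cons, minGt]
    by_cases hq : required < s
    · have h0 : 0 < s - required := by omega
      simp only [h0, if_pos]
      rw [foldlA_some required S s hq]
      cases minGt required S with
      | none => simp [hq]
      | some m => simp [hq]
    · have h0 : ¬ 0 < s - required := by omega
      simp only [h0, if_neg, not_false_iff]
      rw [ih]
      cases minGt required S with
      | none => simp [hq]
      | some m => simp [hq]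

-- minGt is invariant under permutation
theorem minGt_perm (required : Int) {S T : List Int} (h : S.Perm T) :
    minGt required S = minGt required T := by
  induction h with
  | nil => rfl
  | cons x _ ih => simp only [minGt, ih]
  | swap x y S =>
    simp only [minGt]
    cases minGt required S with
    | none =>
      by_cases hx : required < x <;> by_cases hy : required < y <;>
        simp [hx, hy, min_comm x y]
    | some m =>
      by_cases hx : required < x <;> by_cases hy : required < y <;>
        simp [hx, hy, min_left_comm x y m]
  | trans _ _ ih1 ih2 => rw [ih1, ih2]

-- on a ≤-sorted list, the first element over the threshold is the minimum one over it
theorem firstGt_of_pairwise (required : Int) (T : List Int)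
    (h : T.Pairwise (fun a b => a ≤ b)) :
    firstGt required T = (minGt required T).getD 0 := by
  induction T with
  | nil => rfl
  | cons s T ih =>
    rcases List.pairwise_cons.mp h with ⟨hle, hT⟩
    simp only [firstGt, minGt]
    by_cases hq : required < s
    · cases hS : minGt required T with
      | none => simp [hq]
      | some m =>
        have : min s m = s := min_eq_left (hle m (mem_of_minGt_eq_some hS))
        simp [hq, this]
    · cases hS : minGt required T with
      | none => simp [hq, ih hT, hS]
      | some m => simp [hq, ih hT, hS]

-- the two loop bodies over the values list compute the same second component
theorem loops_agree (required : Int) (V : List (List (String × Int))) :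
    (V.foldl (part2Body required) (none, 0)).2
    = firstGt required
        (PySem.List.sorted (V.map (fun v => (PySem.Dict.ofList v).getD "size" 0)) (fun x => x) false) := by
  set S := V.map (fun v => (PySem.Dict.ofList v).getD "size" 0) with hS
  have hfold : V.foldl (part2Body required) (none, 0)
      = S.foldl (fun st s =>
          (if 0 < s - required then
            match st.1 with
            | none => (some (s - required), s)
            | some dd => if s - required < dd then (some (s - required), s) else st
          else st : Option Int × Int)) (none, 0) := by
    rw [hS, List.foldl_map]
    rfl
  rw [hfold, foldlA_none]
  rw [firstGt_of_pairwise required _ (PySem.List.sorted_pairwise S (fun x => x) )]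
  rw [minGt_perm required (PySem.List.sorted_perm S (fun x => x) false)]

-- ===== VERDICT (by name: the statement is the Claim_ definition above) =====
theorem part2_spec : Claim_equal_part2 := by
  intro dir _ _
  unfold Spec_part2
  cases hr : (PySem.Dict.ofList dir).get? "/" with
  | none => simp [part2, part2_alt, hr]
  | some root =>
    cases hs : (PySem.Dict.ofList root).get? "size" with
    | none => simp [part2, part2_alt, hr, hs]
    | some rootSize =>
      simp only [part2, part2_alt, hr, hs]
      exact loops_agree _ _
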